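-- pv_equiv track=rewrite | github.com/HeapOfPackrats/AoC2017 | day20b.py | findSlowest
-- ===== SOURCE A (Python) =====
-- def findSlowest(particles):
--     velocities = particles["velocities"]
--     accelerations = particles["accelerations"]
--
--     slowestID = 0
--     slowestA = sum(map(abs,accelerations[0]))
--     for i in range(1,len(accelerations)):
--         a = sum(map(abs,accelerations[i]))
--         if a < slowestA:
--             slowestID = i
--             slowestA = a
--         elif a == slowestA:
--             slowestAgreement = 0
--             agreement = 0
--             for x, y in zip(velocities[slowestID], accelerations[slowestID]):
--                 if x*y != 0:
--                     slowestAgreement += x*y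
--                 else:
--                     slowestAgreement += abs(x) + abs(y)
--             for x, y in zip(velocities[i], accelerations[i]):
--                 if x*y != 0:
--                     agreement += x*y
--                 else:
--                     agreement += abs(x) + abs(y)
--             if agreement < slowestAgreement:
--                 slowestID = i
--                 slowestA = a
--             else:
--                 continue
--     return slowestID
-- ===== SOURCE B (Python) =====
-- def findSlowest(particles):
--     velocities = particles["velocities"]
--     accelerations = particles["accelerations"]
--     mags = [sum(map(abs, a)) for a in accelerations]
--     m = min(mags)
--     candidates = [i for i, v in enumerate(mags) if v == m]
--     if len(candidates) == 1:
--         return candidates[0]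
--
--     def agreement(i):
--         return sum(x * y if x * y != 0 else abs(x) + abs(y)
--                    for x, y in zip(velocities[i], accelerations[i]))
--
--     best = candidates[0]
--     bestAgreement = agreement(best)
--     for i in candidates[1:]:
--         ai = agreement(i)
--         if ai < bestAgreement:
--             best, bestAgreement = i, ai
--     return best
-- ===== Notes on version B (the rewrite author's own statement) =====
-- stated objective: alternative
-- what changed: A keeps a running (id, magnitude) minimum in one loop and recomputes the tie-break agreement inside it; B first computes all acceleration magnitudes, takes the minimum, collects the tied candidate indices, returns immediately if unique, and otherwise runs a separate agreement-minimising pass over only the tied candidates.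
import Mathlib
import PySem

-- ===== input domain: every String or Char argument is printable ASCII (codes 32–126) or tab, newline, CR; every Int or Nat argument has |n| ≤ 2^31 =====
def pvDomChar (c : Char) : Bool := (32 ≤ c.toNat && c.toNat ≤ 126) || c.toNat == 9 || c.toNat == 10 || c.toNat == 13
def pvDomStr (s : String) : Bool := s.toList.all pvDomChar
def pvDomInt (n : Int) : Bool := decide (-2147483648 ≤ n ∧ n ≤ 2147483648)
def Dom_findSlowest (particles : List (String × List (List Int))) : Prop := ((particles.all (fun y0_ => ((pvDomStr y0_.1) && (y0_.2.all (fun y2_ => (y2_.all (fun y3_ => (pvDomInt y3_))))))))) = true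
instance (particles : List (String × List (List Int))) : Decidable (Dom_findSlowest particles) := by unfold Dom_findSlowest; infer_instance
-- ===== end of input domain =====

-- B changes the decomposition (magnitude pass + candidate tie-break pass instead of one
-- running-minimum loop with inline tie-breaks); same cost, equivalence of return values proved.

-- ===== PORT A =====
-- sum(map(abs, l))
def pvAbsSum (l : List Int) : Int := (l.map (fun x => |x|)).sum

-- the agreement accumulation loop: for x, y in zip(v, a): ...
def pvAgree (v a : List Int) : Int :=
  (List.zip v a).foldl
    (fun s p => if p.1 * p.2 ≠ 0 then s + p.1 * p.2 else s + (|p.1| + |p.2|)) 0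

-- the body of A's for-loop over i, state (slowestID, slowestA)
def findSlowestStep (velocities accelerations : List (List Int)) (st : Int × Int) (i : Int) :
    Int × Int :=
  let a := pvAbsSum (PySem.List.pyGetD accelerations i [])
  if a < st.2 then (i, a)
  else if a = st.2 then
    let slowestAgreement := pvAgree (PySem.List.pyGetD velocities st.1 [])
      (PySem.List.pyGetD accelerations st.1 [])
    let agreement := pvAgree (PySem.List.pyGetD velocities i [])
      (PySem.List.pyGetD accelerations i [])
    if agreement < slowestAgreement then (i, a) else st
  else st

def findSlowest (particles : List (String × List (List Int))) : Int :=
  let velocities := ((PySem.Dict.mk particles).get? "velocities").getD []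
  let accelerations := ((PySem.Dict.mk particles).get? "accelerations").getD []
  let r := (PySem.List.pyRange 1 (accelerations.length : Int) 1).foldl
    (findSlowestStep velocities accelerations)
    (0, pvAbsSum (PySem.List.pyGetD accelerations 0 []))
  r.1

-- ===== PORT B =====
-- the body of B's tie-break loop over the remaining candidates, state (best, bestAgreement)
def findSlowestTieStep (velocities accelerations : List (List Int)) (st : Int × Int) (i : Int) :
    Int × Int :=
  let ai := pvAgree (PySem.List.pyGetD velocities i []) (PySem.List.pyGetD accelerations i [])
  if ai < st.2 then (i, ai) else st

def findSlowest_alt (particles : List (String × List (List Int))) : Int :=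
  let velocities := ((PySem.Dict.mk particles).get? "velocities").getD []
  let accelerations := ((PySem.Dict.mk particles).get? "accelerations").getD []
  let mags := accelerations.map pvAbsSum
  let m := (PySem.List.min? mags (fun x => x)).getD 0
  let candidates := ((PySem.List.enumerate mags 0).filter (fun p => p.2 == m)).map (·.1)
  match candidates with
  | [] => 0   -- unreachable under Pre_: Python B raises ValueError at min([]) only when accelerations = []
  | [c] => c
  | c :: rest =>
    let r := rest.foldl (findSlowestTieStep velocities accelerations)
      (c, pvAgree (PySem.List.pyGetD velocities c []) (PySem.List.pyGetD accelerations c []))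
    r.1

-- ===== PRECONDITION & SPEC =====
-- magnitude of one row, as Pre_ speaks about it (kept separate from the port helpers)
def preMag (l : List Int) : Int := (l.map (fun x => |x|)).sum

-- Pre_ excludes exactly the inputs where the Python A raises: a missing "velocities" or
-- "accelerations" key (KeyError), empty accelerations (IndexError at accelerations[0]), and
-- inputs where some magnitude tie event — a row i whose |·|-sum equals the minimum over rows
-- 0..i-1 — occurs at an index i with no velocity row (IndexError at velocities[i]).
def Pre_findSlowest (particles : List (String × List (List Int))) : Prop :=
  ((PySem.Dict.mk particles).get? "velocities").isSome = true ∧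
  ((PySem.Dict.mk particles).get? "accelerations").getD [] ≠ [] ∧
  (∀ i, i < (((PySem.Dict.mk particles).get? "accelerations").getD []).length →
    (((PySem.Dict.mk particles).get? "velocities").getD []).length ≤ i →
    ∀ j, j < i →
      preMag ((((PySem.Dict.mk particles).get? "accelerations").getD []).getD j []) =
        preMag ((((PySem.Dict.mk particles).get? "accelerations").getD []).getD i []) →
      ∃ k, k < i ∧
        preMag ((((PySem.Dict.mk particles).get? "accelerations").getD []).getD k []) <
          preMag ((((PySem.Dict.mk particles).get? "accelerations").getD []).getD i []))

instance (particles : List (String × List (List Int))) : Decidable (Pre_findSlowest particles) := by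
  unfold Pre_findSlowest; infer_instance

def pvWitness_findSlowest : (List (String × List (List Int))) :=
  [("velocities", [[1, 2], [0, 0]]), ("accelerations", [[1, 1], [1, -1]])]

def Spec_findSlowest (particles : List (String × List (List Int))) (out : Int) : Prop := out = findSlowest_alt particles
instance (particles : List (String × List (List Int))) (out : Int) : Decidable (Spec_findSlowest particles out) := by unfold Spec_findSlowest; infer_instance

-- ===== CLAIM (what is proved, stated in full; the proofs are below) =====
def Claim_equal_findSlowest : Prop := ∀ (particles : List (String × List (List Int))), Dom_findSlowest particles → Pre_findSlowest particles → Spec_findSlowest particles (findSlowest particles)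

-- ===== LEMMAS AND PROOFS =====

-- magnitude and agreement of the particle with index i
def pvMag (acc : List (List Int)) (i : Int) : Int := pvAbsSum (PySem.List.pyGetD acc i [])
def pvAgr (vel acc : List (List Int)) (i : Int) : Int :=
  pvAgree (PySem.List.pyGetD vel i []) (PySem.List.pyGetD acc i [])

-- strict lexicographic order on (magnitude, agreement) keys
def pvKlt (vel acc : List (List Int)) (i j : Int) : Prop :=
  pvMag acc i < pvMag acc j ∨ (pvMag acc i = pvMag acc j ∧ pvAgr vel acc i < pvAgr vel acc j)

-- b is the first index of [0, n) minimising (magnitude, agreement) lexicographically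
def pvIsBest (vel acc : List (List Int)) (n b : Int) : Prop :=
  0 ≤ b ∧ b < n ∧
  (∀ j, 0 ≤ j → j < n → ¬ pvKlt vel acc j b) ∧
  (∀ j, 0 ≤ j → j < b → pvKlt vel acc b j)

theorem pvKlt_trans {vel acc : List (List Int)} {a b c : Int}
    (h1 : pvKlt vel acc a b) (h2 : pvKlt vel acc b c) : pvKlt vel acc a c := by
  unfold pvKlt at *; omega

theorem pvKlt_irrefl (vel acc : List (List Int)) (a : Int) : ¬ pvKlt vel acc a a := by
  unfold pvKlt; omega

theorem pvKlt_of_klt_of_not_klt {vel acc : List (List Int)} {a b c : Int}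
    (h1 : pvKlt vel acc a b) (h2 : ¬ pvKlt vel acc c b) : pvKlt vel acc a c := by
  unfold pvKlt at *; omega

theorem pvIsBest_unique {vel acc : List (List Int)} {n b b' : Int}
    (h : pvIsBest vel acc n b) (h' : pvIsBest vel acc n b') : b = b' := by
  obtain ⟨hb0, hbn, hball, hbfst⟩ := h
  obtain ⟨hb'0, hb'n, hb'all, hb'fst⟩ := h'
  rcases lt_trichotomy b b' with hlt | heq | hgt
  · exact absurd (hb'fst b hb0 hlt) (hball b' hb'0 hb'n)
  · exact heq
  · exact absurd (hbfst b' hb'0 hgt) (hb'all b hb0 hbn)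

theorem pv_best_take {vel acc : List (List Int)} {p b : Int}
    (hb : pvIsBest vel acc p b) (h : pvKlt vel acc p b) : pvIsBest vel acc (p + 1) p := by
  obtain ⟨hb0, hbn, hball, hbfst⟩ := hb
  refine ⟨by omega, by omega, ?_, ?_⟩
  · intro j hj0 hjp hklt
    rcases lt_or_eq_of_le (by omega : j ≤ p) with hlt | rfl
    · exact hball j hj0 hlt (pvKlt_trans hklt h)
    · exact pvKlt_irrefl vel acc j hklt
  · intro j hj0 hjp
    exact pvKlt_of_klt_of_not_klt h (hball j hj0 hjp)

theorem pv_best_keep {vel acc : List (List Int)} {p b : Int}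
    (hb : pvIsBest vel acc p b) (h : ¬ pvKlt vel acc p b) : pvIsBest vel acc (p + 1) b := by
  obtain ⟨hb0, hbn, hball, hbfst⟩ := hb
  refine ⟨hb0, by omega, ?_, hbfst⟩
  intro j hj0 hjp hklt
  rcases lt_or_eq_of_le (by omega : j ≤ p) with hlt | rfl
  · exact hball j hj0 hlt hklt
  · exact h hklt

theorem pvStepA_preserves (vel acc : List (List Int)) (p : Int)
    (st : Int × Int) (h2 : st.2 = pvMag acc st.1) (hb : pvIsBest vel acc p st.1) :
    (findSlowestStep vel acc st p).2 = pvMag acc (findSlowestStep vel acc st p).1 ∧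
    pvIsBest vel acc (p + 1) (findSlowestStep vel acc st p).1 := by
  unfold pvMag at h2
  simp only [findSlowestStep]
  split_ifs with h1 heq hag
  · refine ⟨rfl, pv_best_take hb ?_⟩
    unfold pvKlt pvMag; omega
  · refine ⟨rfl, pv_best_take hb ?_⟩
    unfold pvKlt pvMag pvAgr; omega
  · refine ⟨h2, pv_best_keep hb ?_⟩
    unfold pvKlt pvMag pvAgr; omega
  · refine ⟨h2, pv_best_keep hb ?_⟩
    unfold pvKlt pvMag pvAgr; omega

theorem pvFoldA_spec (vel acc : List (List Int)) (m : Nat) :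
    ((PySem.List.pyRange 1 (1 + (m : Int)) 1).foldl (findSlowestStep vel acc)
        (0, pvAbsSum (PySem.List.pyGetD acc 0 []))).2 =
      pvMag acc ((PySem.List.pyRange 1 (1 + (m : Int)) 1).foldl (findSlowestStep vel acc)
        (0, pvAbsSum (PySem.List.pyGetD acc 0 []))).1 ∧
    pvIsBest vel acc (1 + (m : Int))
      ((PySem.List.pyRange 1 (1 + (m : Int)) 1).foldl (findSlowestStep vel acc)
        (0, pvAbsSum (PySem.List.pyGetD acc 0 []))).1 := by
  induction m with
  | zero =>
    rw [PySem.List.pyRange_one_eq_nil (by omega)]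
    simp only [List.foldl_nil, Nat.cast_zero]
    refine ⟨rfl, le_refl 0, by omega, ?_, fun j h1 h2 => absurd h2 (by omega)⟩
    intro j hj0 hj1 hk
    have hj : j = 0 := by omega
    subst hj
    exact pvKlt_irrefl vel acc 0 hk
  | succ k ih =>
    have hc : (1 + ((k + 1 : Nat) : Int)) = (1 + (k : Int)) + 1 := by push_cast; ring
    rw [hc, PySem.List.pyRange_one_succ_right (show (1 : Int) ≤ 1 + (k : Int) by omega),
      List.foldl_append, List.foldl_cons, List.foldl_nil]
    obtain ⟨ih2, ihb⟩ := ih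
    exact pvStepA_preserves vel acc (1 + (k : Int)) _ ih2 ihb

-- B's tie-break fold over a strictly increasing list of indices: first strict argmin of pvAgr
theorem pvFoldB_spec (vel acc : List (List Int)) (l : List Int) :
    ∀ b : Int, l.Pairwise (· < ·) → (∀ i ∈ l, b < i) →
    ((l.foldl (findSlowestTieStep vel acc) (b, pvAgr vel acc b)).1 = b ∨
        (l.foldl (findSlowestTieStep vel acc) (b, pvAgr vel acc b)).1 ∈ l) ∧
    pvAgr vel acc (l.foldl (findSlowestTieStep vel acc) (b, pvAgr vel acc b)).1 ≤ pvAgr vel acc b ∧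
    (∀ i ∈ l, pvAgr vel acc (l.foldl (findSlowestTieStep vel acc) (b, pvAgr vel acc b)).1 ≤ pvAgr vel acc i) ∧
    ((l.foldl (findSlowestTieStep vel acc) (b, pvAgr vel acc b)).1 ≠ b →
        pvAgr vel acc (l.foldl (findSlowestTieStep vel acc) (b, pvAgr vel acc b)).1 < pvAgr vel acc b) ∧
    (∀ i ∈ l, i < (l.foldl (findSlowestTieStep vel acc) (b, pvAgr vel acc b)).1 →
        pvAgr vel acc (l.foldl (findSlowestTieStep vel acc) (b, pvAgr vel acc b)).1 < pvAgr vel acc i) := by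
  induction l with
  | nil =>
    intro b _ _
    simp
  | cons i t ih =>
    intro b hpw hgt
    have hpw' : t.Pairwise (· < ·) := hpw.of_cons
    have hbi : b < i := hgt i (by simp)
    have hit : ∀ j ∈ t, i < j := fun j hj => (List.pairwise_cons.mp hpw).1 j hj
    simp only [List.foldl_cons]
    by_cases hlt : pvAgr vel acc i < pvAgr vel acc b
    · have hlt' := hlt
      unfold pvAgr at hlt'
      have hstep : findSlowestTieStep vel acc (b, pvAgr vel acc b) i = (i, pvAgr vel acc i) := by
        simp [findSlowestTieStep, pvAgr, hlt']
      rw [hstep]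
      obtain ⟨gmem, gle, gall, gstr, gfst⟩ := ih i hpw' hit
      refine ⟨Or.inr ?_, by omega, ?_, fun _ => by omega, ?_⟩
      · rcases gmem with h | h
        · rw [h]; exact List.mem_cons_self
        · exact List.mem_cons_of_mem _ h
      · intro j hj
        rcases List.mem_cons.mp hj with rfl | hj
        · omega
        · exact gall j hj
      · intro j hj hjlt
        rcases List.mem_cons.mp hj with rfl | hj
        · exact gstr (by omega)
        · exact gfst j hj hjlt
    · have hlt' : ¬ pvAgree (PySem.List.pyGetD vel i []) (PySem.List.pyGetD acc i []) <
          pvAgree (PySem.List.pyGetD vel b []) (PySem.List.pyGetD acc b []) := by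
        unfold pvAgr at hlt; exact hlt
      have hstep : findSlowestTieStep vel acc (b, pvAgr vel acc b) i = (b, pvAgr vel acc b) := by
        simp [findSlowestTieStep, pvAgr, hlt']
      rw [hstep]
      have hbt : ∀ j ∈ t, b < j := fun j hj => lt_trans hbi (hit j hj)
      obtain ⟨gmem, gle, gall, gstr, gfst⟩ := ih b hpw' hbt
      refine ⟨?_, gle, ?_, gstr, ?_⟩
      · rcases gmem with h | h
        · exact Or.inl h
        · exact Or.inr (List.mem_cons_of_mem _ h)
      · intro j hj
        rcases List.mem_cons.mp hj with rfl | hj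
        · omega
        · exact gall j hj
      · intro j hj hjlt
        rcases List.mem_cons.mp hj with rfl | hj
        · rcases gmem with hres | hres
          · omega
          · have hne : (t.foldl (findSlowestTieStep vel acc) (b, pvAgr vel acc b)).1 ≠ b := by
              have := hbt _ hres; omega
            have := gstr hne
            omega
        · exact gfst j hj hjlt

theorem pvMag_natCast (acc : List (List Int)) (k : Nat) (hk : k < acc.length) :
    pvMag acc (k : Int) = (acc.map pvAbsSum)[k]'(by simpa using hk) := by
  unfold pvMag
  rw [PySem.List.pyGetD_natCast, List.getD_eq_getElem _ _ hk, List.getElem_map]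

-- the candidate list of B: all indices of minimal magnitude, in increasing order
theorem pvCands_spec (acc : List (List Int)) (hacc : acc ≠ []) :
    ∃ m0 : Int, PySem.List.min? (acc.map pvAbsSum) (fun x => x) = some m0 ∧
    (∀ i : Int, i ∈ (((PySem.List.enumerate (acc.map pvAbsSum) 0).filter
        (fun p => p.2 == m0)).map (·.1)) ↔
      0 ≤ i ∧ i < (acc.length : Int) ∧ pvMag acc i = m0) ∧
    ((((PySem.List.enumerate (acc.map pvAbsSum) 0).filter
        (fun p => p.2 == m0)).map (·.1)).Pairwise (· < ·)) ∧
    ((((PySem.List.enumerate (acc.map pvAbsSum) 0).filter (fun p => p.2 == m0)).map (·.1)) ≠ []) ∧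
    (∀ j : Int, 0 ≤ j → j < (acc.length : Int) → m0 ≤ pvMag acc j) := by
  have hmagsne : acc.map pvAbsSum ≠ [] := by
    intro h; exact hacc (List.map_eq_nil_iff.mp h)
  obtain ⟨m0, hm0⟩ : ∃ m0, PySem.List.min? (acc.map pvAbsSum) (fun x => x) = some m0 := by
    cases hx : PySem.List.min? (acc.map pvAbsSum) (fun x => x) with
    | none => exact absurd ((PySem.List.min?_eq_none_iff (acc.map pvAbsSum) (fun x => x)).mp hx) hmagsne
    | some m0 => exact ⟨m0, rfl⟩
  have hlenm : (acc.map pvAbsSum).length = acc.length := List.length_map ..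
  have hmem : ∀ i : Int, i ∈ (((PySem.List.enumerate (acc.map pvAbsSum) 0).filter
      (fun p => p.2 == m0)).map (·.1)) ↔
      0 ≤ i ∧ i < (acc.length : Int) ∧ pvMag acc i = m0 := by
    intro i
    simp only [List.mem_map, List.mem_filter, PySem.List.mem_enumerate_iff]
    constructor
    · rintro ⟨p, ⟨⟨k, hk, rfl⟩, hq⟩, rfl⟩
      have hk' : k < acc.length := by omega
      have hq' : (acc.map pvAbsSum)[k] = m0 := beq_iff_eq.mp hq
      refine ⟨by simp, by simp; omega, ?_⟩
      have : (0 : Int) + (k : Int) = (k : Int) := by omega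
      rw [this, pvMag_natCast acc k hk']
      exact hq'
    · rintro ⟨h0, hn, hm⟩
      have hk : i.toNat < (acc.map pvAbsSum).length := by omega
      have hcast : ((i.toNat : Int)) = i := Int.toNat_of_nonneg h0
      refine ⟨((0 : Int) + (i.toNat : Int), (acc.map pvAbsSum)[i.toNat]), ⟨⟨i.toNat, hk, rfl⟩, ?_⟩, by simp; omega⟩
      rw [beq_iff_eq, ← pvMag_natCast acc i.toNat (by omega), hcast]
      exact hm
  refine ⟨m0, hm0, hmem, ?_, ?_, ?_⟩
  · exact List.pairwise_map.mpr ((PySem.List.pairwise_lt_enumerate (acc.map pvAbsSum) 0).filter _)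
  · have hmm : m0 ∈ acc.map pvAbsSum := PySem.List.min?_mem hm0
    obtain ⟨k, hk, hkeq⟩ := List.mem_iff_getElem.mp hmm
    have hkc : (k : Int) ∈ (((PySem.List.enumerate (acc.map pvAbsSum) 0).filter
        (fun p => p.2 == m0)).map (·.1)) := by
      refine (hmem (k : Int)).mpr ⟨by omega, by omega, ?_⟩
      rw [pvMag_natCast acc k (by omega)]
      exact hkeq
    exact List.ne_nil_of_mem hkc
  · intro j hj0 hjn
    have hk : j.toNat < acc.length := by omega
    have hcast : ((j.toNat : Int)) = j := Int.toNat_of_nonneg hj0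
    have hmemj : pvMag acc j ∈ acc.map pvAbsSum := by
      rw [← hcast, pvMag_natCast acc j.toNat hk]
      exact List.getElem_mem _
    exact PySem.List.min?_isMin hm0 _ hmemj

-- B's tie-break result is the first lexicographic minimum, also when rest = []
theorem pvTie_isBest (vel acc : List (List Int)) (m0 c : Int) (rest : List Int)
    (hmem : ∀ i : Int, i ∈ c :: rest ↔ 0 ≤ i ∧ i < (acc.length : Int) ∧ pvMag acc i = m0)
    (hpair : (c :: rest).Pairwise (· < ·))
    (hmin : ∀ j : Int, 0 ≤ j → j < (acc.length : Int) → m0 ≤ pvMag acc j) :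
    pvIsBest vel acc (acc.length : Int)
      ((rest.foldl (findSlowestTieStep vel acc) (c, pvAgr vel acc c)).1) := by
  obtain ⟨gmem, gle, gall, gstr, gfst⟩ :=
    pvFoldB_spec vel acc rest c hpair.of_cons (List.pairwise_cons.mp hpair).1
  have hrmem : (rest.foldl (findSlowestTieStep vel acc) (c, pvAgr vel acc c)).1 ∈ c :: rest := by
    rcases gmem with h | h
    · rw [h]; exact List.mem_cons_self
    · exact List.mem_cons_of_mem _ h
  obtain ⟨hr0, hrn, hrm⟩ := (hmem _).mp hrmem
  refine ⟨hr0, hrn, ?_, ?_⟩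
  · intro j hj0 hjn hk
    have hjm := hmin j hj0 hjn
    unfold pvKlt at hk
    rcases hk with hk | ⟨hkeq, hka⟩
    · omega
    · have hj : j ∈ c :: rest := (hmem j).mpr ⟨hj0, hjn, by omega⟩
      rcases List.mem_cons.mp hj with rfl | hj
      · omega
      · have := gall j hj; omega
  · intro j hj0 hjr
    have hjn : j < (acc.length : Int) := by omega
    have hjm := hmin j hj0 hjn
    unfold pvKlt
    by_cases hjeq : pvMag acc j = m0
    · have hj : j ∈ c :: rest := (hmem j).mpr ⟨hj0, hjn, hjeq⟩
      right
      refine ⟨by omega, ?_⟩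
      rcases List.mem_cons.mp hj with rfl | hj
      · exact gstr (by omega)
      · exact gfst j hj hjr
    · left; omega

-- the two loop results agree for any nonempty accelerations list
theorem pvAB (vel acc : List (List Int)) (hacc : acc ≠ []) :
    ((PySem.List.pyRange 1 (acc.length : Int) 1).foldl (findSlowestStep vel acc)
        (0, pvAbsSum (PySem.List.pyGetD acc 0 []))).1 =
    (match (((PySem.List.enumerate (acc.map pvAbsSum) 0).filter
        (fun p => p.2 == ((PySem.List.min? (acc.map pvAbsSum) (fun x => x)).getD 0))).map (·.1)) with
      | [] => (0 : Int)
      | [c] => c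
      | c :: rest => (rest.foldl (findSlowestTieStep vel acc)
          (c, pvAgree (PySem.List.pyGetD vel c []) (PySem.List.pyGetD acc c []))).1) := by
  obtain ⟨m0, hm0, hmem, hpair, hne, hmin⟩ := pvCands_spec acc hacc
  rw [hm0]
  simp only [Option.getD_some]
  have hlen1 : 0 < acc.length := List.length_pos_of_ne_nil hacc
  have hcast : (acc.length : Int) = 1 + ((acc.length - 1 : Nat) : Int) := by omega
  have hA := (pvFoldA_spec vel acc (acc.length - 1)).2
  rw [← hcast] at hA
  rcases hcands : (((PySem.List.enumerate (acc.map pvAbsSum) 0).filter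
      (fun p => p.2 == m0)).map (·.1)) with _ | ⟨c, rest⟩
  · exact absurd hcands hne
  · rw [hcands] at hmem hpair
    rw [hcands]
    have hB := pvTie_isBest vel acc m0 c rest hmem hpair hmin
    rcases rest with _ | ⟨r1, rs⟩
    · exact pvIsBest_unique hA (by simpa using hB)
    · exact pvIsBest_unique hA hB

-- ===== VERDICT (by name: the statement is the Claim_ definition above) =====
theorem findSlowest_spec : Claim_equal_findSlowest := by
  intro particles _ hpre
  obtain ⟨hv, hne, hties⟩ := hpre
  show findSlowest particles = findSlowest_alt particles
  unfold findSlowest findSlowest_alt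
  exact pvAB (((PySem.Dict.mk particles).get? "velocities").getD [])
    (((PySem.Dict.mk particles).get? "accelerations").getD []) hne
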